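-- pv_equiv track=rewrite | github.com/adibk/sudoku | src/utils/calculus.py | perfect_sqrt
-- ===== SOURCE A (Python) =====
-- def perfect_sqrt(nb):
--     """
--     Calculate the square root of a nb if it's a perfect square.
--     A perfect square is an integer that is the square of an integer.
--     For example, 16 is a perfect square because 4 * 4 = 16.
--     This function returns the integer square root if the nb is a perfect
--     square. Otherwise, it returns None.
--
--     Args:
--     - nb (int): The nb for which to find the square root.
--
--     Returns:
--     - int or None: The square root of the nb if it's a perfect square,
--     otherwise None.
--     """
--     if nb < 0:
--         return None
--     if nb == 0 or nb == 1:
--         return nb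
--     left, right = 1, nb // 2
--
--     while left <= right:
--         mid = (left + right) // 2
--         square = mid * mid
--         if square == nb:
--             return mid
--         elif square < nb:
--             left = mid + 1
--         else:
--             right = mid - 1
--
--     return None
-- ===== SOURCE B (Python) =====
-- def perfect_sqrt(nb):
--     """Integer sqrt via Newton's method; returns it only for perfect squares."""
--     if nb < 0:
--         return None
--     if nb < 2:
--         return nb
--     x = nb
--     y = (x + nb // x) // 2
--     while y < x:
--         x = y
--         y = (x + nb // x) // 2
--     return x if x * x == nb else None
-- ===== Notes on version B (the rewrite author's own statement) =====
-- stated objective: alternative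
-- what changed: Replaces binary search over [1, nb//2] with Newton's method iteration (x -> (x + nb//x)//2) converging to the floor integer square root, then a single perfect-square check.
import Mathlib
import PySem

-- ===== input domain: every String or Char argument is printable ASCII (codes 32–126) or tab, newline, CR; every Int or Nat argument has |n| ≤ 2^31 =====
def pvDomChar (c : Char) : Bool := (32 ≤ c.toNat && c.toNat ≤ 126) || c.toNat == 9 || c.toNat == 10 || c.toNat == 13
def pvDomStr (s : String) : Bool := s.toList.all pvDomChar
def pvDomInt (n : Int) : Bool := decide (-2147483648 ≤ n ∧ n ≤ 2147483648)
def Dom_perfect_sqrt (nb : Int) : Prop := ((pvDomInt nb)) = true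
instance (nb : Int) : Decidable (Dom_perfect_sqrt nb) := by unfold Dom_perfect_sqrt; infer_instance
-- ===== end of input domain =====

-- B replaces A's interval bisection with Newton's method iteration for the floor
-- integer square root followed by one perfect-square check (objective: alternative
-- algorithm; both are sub-millisecond here, no speed claim).

-- ===== PORT A =====
-- the 'while left <= right' binary-search loop of A
def psLoopA (nb left right : Int) : Option Int :=
  if _h : left ≤ right then
    let mid := PySem.Int.floordiv (left + right) 2
    let square := mid * mid
    if square = nb then some mid
    else if square < nb then psLoopA nb (mid + 1) right
    else psLoopA nb left (mid - 1)
  else none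
termination_by (right + 1 - left).toNat
decreasing_by
  · have hb := PySem.Int.floordiv_two_mid_bounds _h
    omega
  · have hb := PySem.Int.floordiv_two_mid_bounds _h
    omega

def perfect_sqrt (nb : Int) : Option Int :=
  if nb < 0 then none
  else if nb = 0 ∨ nb = 1 then some nb
  else psLoopA nb 1 (PySem.Int.floordiv nb 2)

-- ===== PORT B =====
-- the 'while y < x' Newton loop of B (state x; y recomputed each turn).
-- The '0 < x' test is only a totality guard: every reachable state has 1 ≤ x.
def newtonLoop (nb x : Int) : Int :=
  let y := PySem.Int.floordiv (x + PySem.Int.floordiv nb x) 2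
  if y < x then
    if _h : 0 < x then newtonLoop nb y else x
  else x
termination_by x.toNat
decreasing_by omega

def perfect_sqrt_alt (nb : Int) : Option Int :=
  if nb < 0 then none
  else if nb < 2 then some nb
  else
    let x := newtonLoop nb nb
    if x * x = nb then some x else none

-- ===== PRECONDITION & SPEC =====
def Spec_perfect_sqrt (nb : Int) (out : Option Int) : Prop := out = perfect_sqrt_alt nb
instance (nb : Int) (out : Option Int) : Decidable (Spec_perfect_sqrt nb out) := by unfold Spec_perfect_sqrt; infer_instance

-- ===== CLAIM (what is proved, stated in full; the proofs are below) =====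
def Claim_equal_perfect_sqrt : Prop := ∀ (nb : Int), Dom_perfect_sqrt nb → Spec_perfect_sqrt nb (perfect_sqrt nb)

-- ===== LEMMAS AND PROOFS =====

-- floor integer square root, the common reference point of both proofs
def intSqrt (nb : Int) : Int := (Nat.sqrt nb.toNat : Int)

theorem intSqrt_bounds (nb : Int) (h : 0 ≤ nb) :
    0 ≤ intSqrt nb ∧ intSqrt nb * intSqrt nb ≤ nb ∧ nb < (intSqrt nb + 1) * (intSqrt nb + 1) := by
  unfold intSqrt
  have h1 : nb.toNat.sqrt * nb.toNat.sqrt ≤ nb.toNat := by have := Nat.sqrt_le' nb.toNat; nlinarith [this]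
  have h2 : nb.toNat < (nb.toNat.sqrt + 1) * (nb.toNat.sqrt + 1) := by have := Nat.lt_succ_sqrt' nb.toNat; nlinarith [this]
  have e : ((nb.toNat : Int)) = nb := Int.toNat_of_nonneg h
  zify at h1 h2
  rw [e] at h1 h2
  exact ⟨by positivity, h1, by linarith⟩

theorem intSqrt_unique (nb m : Int) (h : 0 ≤ nb) (hm : 0 ≤ m) (hsq : m * m = nb) :
    m = intSqrt nb := by
  obtain ⟨hs0, hs1, hs2⟩ := intSqrt_bounds nb h
  by_contra hne
  rcases lt_or_gt_of_ne hne with hlt | hgt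
  · nlinarith
  · nlinarith

theorem intSqrt_pos (nb : Int) (h : 1 ≤ nb) : 1 ≤ intSqrt nb := by
  obtain ⟨hs0, hs1, hs2⟩ := intSqrt_bounds nb (by omega)
  nlinarith

theorem psLoopA_eq (nb : Int) (hnb : 2 ≤ nb) :
    ∀ (n : Nat) (l r : Int), (r + 1 - l).toNat = n → 1 ≤ l →
      (intSqrt nb * intSqrt nb = nb → l ≤ intSqrt nb ∧ intSqrt nb ≤ r) →
      psLoopA nb l r = if intSqrt nb * intSqrt nb = nb then some (intSqrt nb) else none := by
  intro n
  induction n using Nat.strong_induction_on with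
  | _ n ih =>
    intro l r hn hl hinv
    obtain ⟨hs0, hs1, hs2⟩ := intSqrt_bounds nb (by omega)
    rw [psLoopA]
    by_cases hlr : l ≤ r
    · simp only [hlr, dif_pos]
      have hmid := PySem.Int.floordiv_two_mid_bounds hlr
      set mid := PySem.Int.floordiv (l + r) 2 with hm
      by_cases heq : mid * mid = nb
      · have : mid = intSqrt nb := intSqrt_unique nb mid (by omega) (by omega) heq
        simp [this ▸ heq, this]
      · simp only [heq, if_false]
        by_cases hlt : mid * mid < nb
        · simp only [hlt, if_true]
          apply ih (r + 1 - (mid + 1)).toNat (by omega) (mid + 1) r rfl (by omega)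
          intro hperf
          obtain ⟨h1, h2⟩ := hinv hperf
          constructor
          · -- mid*mid < nb = s*s and mid ≥ 0 gives mid < s
            nlinarith
          · exact h2
        · simp only [hlt, if_false]
          apply ih (mid - 1 + 1 - l).toNat (by omega) l (mid - 1) rfl hl
          intro hperf
          obtain ⟨h1, h2⟩ := hinv hperf
          refine ⟨h1, ?_⟩
          -- s*s = nb < mid*mid gives s < mid
          have hgt : nb < mid * mid := (not_lt.mp hlt).lt_of_ne (fun e => heq e.symm)
          by_contra hc
          have hms : mid ≤ intSqrt nb := by omega
          have : mid * mid ≤ intSqrt nb * intSqrt nb := mul_self_le_mul_self (by omega) hms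
          omega
    · simp only [hlr, dif_neg, not_false_iff]
      split_ifs with hperf
      · exact absurd (hinv hperf) (by omega)
      · rfl

theorem newtonLoop_eq (nb : Int) (hnb : 2 ≤ nb) :
    ∀ (n : Nat) (x : Int), x.toNat = n → intSqrt nb ≤ x →
      newtonLoop nb x = intSqrt nb := by
  intro n
  induction n using Nat.strong_induction_on with
  | _ n ih =>
    intro x hn hx
    obtain ⟨hs0, hs1, hs2⟩ := intSqrt_bounds nb (by omega)
    have hs1' : 1 ≤ intSqrt nb := intSqrt_pos nb (by omega)
    have hxpos : 0 < x := by omega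
    rw [newtonLoop]
    set q := PySem.Int.floordiv nb x with hq
    set y := PySem.Int.floordiv (x + q) 2 with hy
    -- y ≥ s : from (x - s)^2 ≥ 0 and s*s ≤ nb we get (2s - x)*x ≤ nb
    have hqge : 2 * intSqrt nb - x ≤ q := by
      rw [hq, PySem.Int.le_floordiv_iff_mul_le hxpos]
      nlinarith
    have hyge : intSqrt nb ≤ y := by
      rw [hy, PySem.Int.le_floordiv_iff_mul_le (by omega : (0:Int) < 2)]
      omega
    by_cases hlt : y < x
    · simp only [hlt, if_true, hxpos, dif_pos]
      exact ih y.toNat (by omega) y rfl hyge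
    · -- loop ends: x ≤ s, hence x = s
      simp only [hlt, if_false]
      by_contra hne
      have hxgt : intSqrt nb + 1 ≤ x := by omega
      have hqlt : q < x := by
        rw [hq, PySem.Int.floordiv_lt_iff_lt_mul hxpos]
        nlinarith
      have : y < x := by
        rw [hy, PySem.Int.floordiv_lt_iff_lt_mul (by omega : (0:Int) < 2)]
        omega
      omega

theorem perfect_sqrt_eq_alt (nb : Int) : perfect_sqrt nb = perfect_sqrt_alt nb := by
  unfold perfect_sqrt perfect_sqrt_alt
  by_cases hneg : nb < 0
  · simp [hneg]
  · simp only [hneg, if_false]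
    by_cases hsmall : nb = 0 ∨ nb = 1
    · have h2 : nb < 2 := by omega
      simp [hsmall, h2]
    · have hnb : 2 ≤ nb := by omega
      have h2 : ¬ nb < 2 := by omega
      simp only [hsmall, h2, if_false]
      obtain ⟨hs0, hs1, hs2⟩ := intSqrt_bounds nb (by omega)
      have hs1' : 1 ≤ intSqrt nb := intSqrt_pos nb (by omega)
      have hA : psLoopA nb 1 (PySem.Int.floordiv nb 2) =
          if intSqrt nb * intSqrt nb = nb then some (intSqrt nb) else none := by
        apply psLoopA_eq nb hnb _ 1 (PySem.Int.floordiv nb 2) rfl (le_refl 1)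
        intro hperf
        refine ⟨hs1', ?_⟩
        rw [PySem.Int.le_floordiv_iff_mul_le (by omega : (0:Int) < 2)]
        -- s ≥ 2 since nb ≥ 2 is a perfect square; then 2*s ≤ s*s = nb
        nlinarith
      have hB : newtonLoop nb nb = intSqrt nb := by
        apply newtonLoop_eq nb hnb nb.toNat nb rfl
        nlinarith
      rw [hA, hB]

-- ===== VERDICT (by name: the statement is the Claim_ definition above) =====
theorem perfect_sqrt_spec : Claim_equal_perfect_sqrt := by
  intro nb _
  unfold Spec_perfect_sqrt
  exact perfect_sqrt_eq_alt nb
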